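-- pv_equiv track=rewrite | github.com/EcRal5t/ProcessCharaSheet | gr_struct.py | __read_row_syllable
-- ===== SOURCE A (Python) =====
-- from typing import Optional, Any, List, Tuple, Dict, Callable, Union
--
-- def __read_row_syllable(elements: List[str]) -> Tuple[bool, List[str]]:
--     if all([i=="" for i in elements]): return (True, [])
--     elements = [i if isinstance(i, str) else str(i) for i in elements]
--     elements[0] = elements[0] if elements[0]!="0.0" else "" # might costly
--     elements_split = [i.split('/') for i in elements]
--     seperator_count = [len(e)-1 for e in elements_split]
--     seperator_count_filtered = list(filter(lambda x: x>0, seperator_count))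
--     if len(seperator_count_filtered)==0: return (True, ["".join(elements)])
--     retrieve_loop_times = min(seperator_count_filtered)
--     is_valid = retrieve_loop_times == max(seperator_count_filtered)
--     elements_split_pad = [e+[e[-1]]*(retrieve_loop_times-len(e)+1) for e in elements_split]
--     return (is_valid, ["".join([e[i] for e in elements_split_pad]) for i in range(retrieve_loop_times+1)])
-- ===== SOURCE B (Python) =====
-- def __read_row_syllable(elements):
--     if all(i == "" for i in elements):
--         return (True, [])
--     cells = [i if isinstance(i, str) else str(i) for i in elements]
--     if cells[0] == "0.0":
--         cells[0] = ""
--     queues = [c.split('/') for c in cells]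
--     pos = [len(q) - 1 for q in queues if len(q) > 1]
--     if not pos:
--         return (True, ["".join(cells)])
--     lo = min(pos)
--     return (lo == max(pos), _drain(queues, lo))
--
-- def _drain(queues, k):
--     # emit the joined heads, then advance (pop the head of) every multi-token
--     # queue; recurse for k more rounds — exhausted queues keep their last token
--     syllable = "".join(q[0] for q in queues)
--     if k == 0:
--         return [syllable]
--     return [syllable] + _drain([q[1:] if len(q) > 1 else q for q in queues], k - 1)
-- ===== Notes on version B (the rewrite author's own statement) =====
-- stated objective: alternative
-- what changed: B replaces A's padded-lists-then-index-join construction by a recursive queue-drain: each round joins the current heads of per-cell token queues and then pops the head of every multi-token queue, so no padded lists and no positional indexing exist; the validity bound comes from min/max of the multi-token queue sizes.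
import Mathlib
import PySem

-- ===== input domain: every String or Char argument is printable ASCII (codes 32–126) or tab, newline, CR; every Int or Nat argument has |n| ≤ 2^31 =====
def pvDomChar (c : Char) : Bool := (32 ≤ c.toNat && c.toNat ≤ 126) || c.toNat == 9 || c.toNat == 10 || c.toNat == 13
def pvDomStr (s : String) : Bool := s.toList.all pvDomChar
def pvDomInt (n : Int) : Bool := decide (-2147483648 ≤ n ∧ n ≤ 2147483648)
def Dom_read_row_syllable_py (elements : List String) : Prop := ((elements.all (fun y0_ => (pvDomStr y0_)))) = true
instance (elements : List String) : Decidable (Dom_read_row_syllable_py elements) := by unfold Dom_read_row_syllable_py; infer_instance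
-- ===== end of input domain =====

-- B replaces A's padded-lists-then-index-join construction by a recursive queue-drain (join the current
-- heads, pop the head of every multi-token queue, recurse); alternative decomposition, same cost.
-- ===== PORT A =====
-- Literal port of A. In Python, `elements = [i if isinstance(i,str) else str(i) for i in elements]`
-- is the identity on a list of str, ported as `map (fun i => i)`; `elements[0]` is only reached when
-- the list is non-empty (the all-"" guard returns first on []), ported totally via getD/set.
def read_row_syllable_py (elements : List String) : Bool × List String :=
  if (elements.map (fun i => i == "")).all id then (true, [])
  else
    let elements := elements.map (fun i => i)
    let elements := if elements.getD 0 "" == "0.0" then elements.set 0 "" else elements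
    let elements_split := elements.map (fun i => (PySem.Str.split? i "/").getD [])
    let seperator_count := elements_split.map (fun e => (e.length : Int) - 1)
    let seperator_count_filtered := seperator_count.filter (fun x => decide (0 < x))
    if seperator_count_filtered.length = 0 then (true, [PySem.Str.join "" elements])
    else
      let retrieve_loop_times := (PySem.List.min? seperator_count_filtered (fun x => x)).getD 0
      let is_valid := retrieve_loop_times == (PySem.List.max? seperator_count_filtered (fun x => x)).getD 0
      let elements_split_pad := elements_split.map (fun e =>
        e ++ List.replicate (retrieve_loop_times - (e.length : Int) + 1).toNat (PySem.List.pyGetD e (-1) ""))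
      (is_valid,
        (PySem.List.pyRange 0 (retrieve_loop_times + 1) 1).map (fun i =>
          PySem.Str.join "" (elements_split_pad.map (fun e => PySem.List.pyGetD e i ""))))

-- ===== PORT B =====
-- Port of B's helper `_drain`: Python's `if k == 0` is ported as `k ≤ 0` for totality; `_drain` is
-- only called with k ≥ 1, where the two tests agree. `q[0]` is ported as headD "" (every queue that
-- a split produces is non-empty, so the default is never read).
def pvDrain (queues : List (List String)) (k : Int) : List String :=
  let syllable := PySem.Str.join "" (queues.map (fun q => q.headD ""))
  if k ≤ 0 then [syllable]
  else syllable :: pvDrain (queues.map (fun q => if 1 < q.length then q.tail else q)) (k - 1)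
termination_by k.toNat
decreasing_by omega

-- Port of B (Source B). `str(i)` on a str is the identity; `cells[0]` is only reached on a non-empty list.
def read_row_syllable_py_alt (elements : List String) : Bool × List String :=
  if elements.all (fun i => i == "") then (true, [])
  else
    let cells := elements.map (fun i => i)
    let cells := if cells.getD 0 "" == "0.0" then cells.set 0 "" else cells
    let queues := cells.map (fun c => (PySem.Str.split? c "/").getD [])
    let pos := (queues.filter (fun q => decide (1 < q.length))).map (fun q => (q.length : Int) - 1)
    if pos.isEmpty then (true, [PySem.Str.join "" cells])
    else
      let lo := (PySem.List.min? pos (fun x => x)).getD 0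
      (lo == (PySem.List.max? pos (fun x => x)).getD 0, pvDrain queues lo)

-- ===== PRECONDITION & SPEC =====
def Spec_read_row_syllable_py (elements : List String) (out : Bool × List String) : Prop := out = read_row_syllable_py_alt elements
instance (elements : List String) (out : Bool × List String) : Decidable (Spec_read_row_syllable_py elements out) := by unfold Spec_read_row_syllable_py; infer_instance

-- ===== CLAIM =====
def Claim_equal_read_row_syllable_py : Prop := ∀ (elements : List String), Dom_read_row_syllable_py elements → Spec_read_row_syllable_py elements (read_row_syllable_py elements)

-- ===== LEMMAS AND PROOFS =====

-- clamped access into a token list: the value shared by A's padded lists and B's drained queues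
def pvClamp (q : List String) (i : Int) : String :=
  if i ≤ (q.length : Int) - 1 then PySem.List.pyGetD q i "" else PySem.List.pyGetD q ((q.length : Int) - 1) ""

def pvIdx (m : Nat) : List Int := (List.range m).map (fun (j : Nat) => (j : Int))

theorem pvIdx_succ (n : Nat) : pvIdx (n+1) = 0 :: (pvIdx n).map (· + 1) := by
  unfold pvIdx
  rw [List.range_succ_eq_map]
  simp [List.map_map, Function.comp_def]

theorem pvIdx_mem (n : Nat) (i : Int) (h : i ∈ pvIdx n) : 0 ≤ i ∧ i ≤ (n : Int) - 1 := by
  unfold pvIdx at h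
  simp at h
  obtain ⟨j, hj, rfl⟩ := h
  omega

theorem pyRange_eq_pvIdx (m : Nat) : PySem.List.pyRange 0 (m : Int) 1 = pvIdx m := by
  unfold pvIdx
  induction m with
  | zero => decide
  | succ n ih =>
    push_cast
    rw [PySem.List.pyRange_one_append 0 n (n+1) (by omega) (by omega), ih, List.range_succ,
        PySem.List.pyRange_one_cons (by omega)]
    have h0 : PySem.List.pyRange ((n:Int)+1) ((n:Int)+1) 1 = [] :=
      List.eq_nil_of_length_eq_zero (by rw [PySem.List.length_pyRange_one]; omega)
    rw [h0]
    simp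

theorem clamp_zero (q : List String) : pvClamp q 0 = q.headD "" := by
  cases q with
  | nil => decide
  | cons a t =>
    unfold pvClamp
    rw [if_pos (show (0:Int) ≤ (((a::t).length : Int)) - 1 by simp)]
    rw [PySem.List.pyGetD_eq_getElem _ _ (by omega) (by simp)]
    simp

theorem clamp_advance (q : List String) (i : Int) (hi : 0 ≤ i) :
    pvClamp (if 1 < q.length then q.tail else q) i = pvClamp q (i + 1) := by
  unfold pvClamp
  by_cases hq : 1 < q.length
  · rw [if_pos hq]
    have hlt : (q.tail.length : Int) = (q.length : Int) - 1 := by simp; omega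
    by_cases hle : i ≤ (q.tail.length : Int) - 1
    · rw [if_pos hle, if_pos (by omega)]
      rw [PySem.List.pyGetD_eq_getElem _ _ hi (by omega),
          PySem.List.pyGetD_eq_getElem _ _ (by omega) (by omega)]
      rw [List.getElem_tail]
      congr 1
      omega
    · rw [if_neg hle, if_neg (by omega)]
      rw [PySem.List.pyGetD_eq_getElem _ _ (by omega) (by omega),
          PySem.List.pyGetD_eq_getElem _ _ (by omega) (by omega)]
      rw [List.getElem_tail]
      congr 1
      omega
  · rw [if_neg hq]
    rcases q with _ | ⟨a, t⟩
    · simp only [List.length_nil]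
      rw [if_neg (by omega), if_neg (by omega)]
    · have h1 : t = [] := by simp at hq; simpa using hq
      subst h1
      have hl : (([a] : List String).length : Int) = 1 := by simp
      rw [hl]
      rw [if_neg (show ¬ i + 1 ≤ (1:Int) - 1 by omega)]
      by_cases h0 : i ≤ (1:Int) - 1
      · have h00 : i = 0 := by omega
        subst h00
        rw [if_pos (by omega)]
        norm_num
      · rw [if_neg h0]

-- B's drain loop emits exactly the clamped column joins for i = 0 .. n
theorem drain_spec (n : Nat) (queues : List (List String)) :
    pvDrain queues (n : Int)
      = (pvIdx (n+1)).map (fun i => PySem.Str.join "" (queues.map (fun q => pvClamp q i))) := by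
  induction n generalizing queues with
  | zero =>
    unfold pvDrain
    rw [if_pos (by omega)]
    have h1 : pvIdx 1 = [0] := by decide
    rw [h1]
    simp [clamp_zero]
  | succ n ih =>
    rw [show ((n+1 : Nat) : Int) = (n : Int) + 1 by push_cast; ring]
    unfold pvDrain
    rw [if_neg (by omega)]
    rw [show (n : Int) + 1 - 1 = (n : Int) by ring, ih]
    rw [pvIdx_succ (n+1)]
    simp only [List.map_cons, List.map_map]
    congr 1
    · congr 1
      apply List.map_congr_left
      intro q _
      exact (clamp_zero q).symm
    · apply List.map_congr_left
      intro i hi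
      have h0 : 0 ≤ i := (pvIdx_mem _ _ hi).1
      show PySem.Str.join "" (queues.map ((fun q => pvClamp q i) ∘ fun q => if 1 < q.length then q.tail else q))
          = PySem.Str.join "" (queues.map (fun q => pvClamp q (i + 1)))
      congr 1
      apply List.map_congr_left
      intro q _
      exact clamp_advance q i h0

theorem pyGetD_replicate_empty (m : Nat) (i : Int) :
    PySem.List.pyGetD (List.replicate m ("" : String)) i "" = "" := by
  simp only [PySem.List.pyGetD, PySem.List.pyGet?]
  cases h : PySem.List.pyIdx? (List.replicate m ("" : String)).length i with
  | none => rfl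
  | some a => simp [List.getElem?_replicate]; split <;> rfl

-- A's padded cell, indexed at 0 ≤ i ≤ n, is the clamped access
theorem tok_pad (e : List String) (n i : Int) (h0 : 0 ≤ i) (hi : i ≤ n) :
    PySem.List.pyGetD (e ++ List.replicate (n - (e.length : Int) + 1).toNat (PySem.List.pyGetD e (-1) "")) i ""
    = pvClamp e i := by
  unfold pvClamp
  by_cases hle : i ≤ (e.length : Int) - 1
  · rw [if_pos hle]
    have h1 : i < (((e ++ List.replicate (n - (e.length : Int) + 1).toNat (PySem.List.pyGetD e (-1) "")).length : Int)) := by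
      simp; omega
    rw [PySem.List.pyGetD_eq_getElem _ _ h0 h1, PySem.List.pyGetD_eq_getElem _ _ h0 (by omega)]
    rw [List.getElem_append_left (by omega)]
  · rw [if_neg hle]
    rcases e with _ | ⟨a, t⟩
    · show PySem.List.pyGetD (List.replicate _ (PySem.List.pyGetD ([]:List String) (-1) "") ) i "" = _
      have hnil : PySem.List.pyGetD ([]:List String) (-1) "" = "" := by rfl
      rw [hnil, pyGetD_replicate_empty]
      decide
    · set e := a :: t with he
      have hne : e ≠ [] := by simp [he]
      have hlen1 : 1 ≤ (e.length : Int) := by simp [he]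
      have h1 : i < (((e ++ List.replicate (n - (e.length : Int) + 1).toNat (PySem.List.pyGetD e (-1) "")).length : Int)) := by
        simp; omega
      rw [PySem.List.pyGetD_eq_getElem _ _ h0 h1]
      rw [List.getElem_append_right (by omega)]
      rw [List.getElem_replicate]
      rw [PySem.List.pyGetD_neg_one e _ hne]
      rw [PySem.List.pyGetD_eq_getElem _ _ (by omega) (by omega)]
      rw [List.getLast_eq_getElem]
      congr 1
      omega

-- A's filtered count list is B's count-of-filtered list
theorem filt_comm (ps : List (List String)) :
    (ps.map (fun p => (p.length : Int) - 1)).filter (fun x => decide (0 < x))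
    = (ps.filter (fun q => decide (1 < q.length))).map (fun p => (p.length : Int) - 1) := by
  induction ps with
  | nil => rfl
  | cons p t ih =>
    simp only [List.map_cons, List.filter_cons]
    by_cases h : 1 < p.length
    · rw [if_pos (by simp; omega), if_pos (by simpa using h)]
      simp [ih]
    · rw [if_neg (by simp; omega), if_neg (by simpa using h)]
      exact ih

theorem pos_foldl_min (l : List Int) (x : Int) (hx : 0 < x) (hl : ∀ y ∈ l, 0 < y) :
    0 < l.foldl min x := by
  induction l generalizing x with
  | nil => exact hx
  | cons y t ih =>
    simp only [List.foldl_cons]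
    exact ih (min x y) (lt_min hx (hl y List.mem_cons_self)) (fun z hz => hl z (List.mem_cons_of_mem _ hz))

-- ===== VERDICT =====
theorem read_row_syllable_py_spec : Claim_equal_read_row_syllable_py := by
  intro elements _dom
  unfold Spec_read_row_syllable_py read_row_syllable_py read_row_syllable_py_alt
  simp only [List.all_map, Function.comp_def, id]
  by_cases hall : elements.all (fun i => i == "") = true
  · rw [if_pos hall, if_pos hall]
  · rw [if_neg hall, if_neg hall]
    set E := (if (elements.map (fun i => i)).getD 0 "" == "0.0"
              then (elements.map (fun i => i)).set 0 "" else elements.map (fun i => i)) with hE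
    set parts := E.map (fun c => (PySem.Str.split? c "/").getD []) with hP
    rw [filt_comm parts]
    set scf := (parts.filter (fun q => decide (1 < q.length))).map (fun p => (p.length : Int) - 1) with hS
    cases hf : scf with
    | nil => simp
    | cons x t =>
      have hx : 0 < x := by
        have hm : x ∈ scf := by rw [hf]; exact List.mem_cons_self
        rw [hS] at hm
        obtain ⟨q, hq, hqx⟩ := List.mem_map.mp hm
        have := List.of_mem_filter hq
        simp at this
        omega
      have ht : ∀ y ∈ t, 0 < y := by
        intro y hy
        have hm : y ∈ scf := by rw [hf]; exact List.mem_cons_of_mem _ hy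
        rw [hS] at hm
        obtain ⟨q, hq, hqy⟩ := List.mem_map.mp hm
        have := List.of_mem_filter hq
        simp at this
        omega
      have hn : 0 < t.foldl min x := pos_foldl_min t x hx ht
      rw [if_neg (by simp), if_neg (by simp)]
      rw [PySem.List.min?_id_cons, PySem.List.max?_id_cons]
      simp only [Option.getD_some]
      set lo := t.foldl min x with hlo
      have hcast : lo = ((lo.toNat : Nat) : Int) := (Int.toNat_of_nonneg (by omega)).symm
      have hr : PySem.List.pyRange 0 (lo + 1) 1 = pvIdx (lo.toNat + 1) := by
        rw [show lo + 1 = ((lo.toNat + 1 : Nat) : Int) by omega]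
        exact pyRange_eq_pvIdx (lo.toNat + 1)
      have hd : pvDrain parts lo
          = (pvIdx (lo.toNat + 1)).map (fun i => PySem.Str.join "" (parts.map (fun q => pvClamp q i))) := by
        rw [hcast]
        exact drain_spec lo.toNat parts
      rw [hr, hd]
      congr 1
      apply List.map_congr_left
      intro i hi
      obtain ⟨hi0, hi1⟩ := pvIdx_mem _ _ hi
      rw [List.map_map]
      congr 1
      apply List.map_congr_left
      intro e _
      exact tok_pad e lo i hi0 (by omega)
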